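-- pv_equiv track=rewrite | github.com/Thejshri-A/Python-1000 | 500. Daily Air Quality Fluctuation.py | daily_air_quality
-- ===== SOURCE A (Python) =====
-- def daily_air_quality(air_val):
--     max_diff=0
--     day=-1
--     for i in range(len(air_val)-1):
--
--         curr_diff=max(max_diff, air_val[i+1]-air_val[i])
--         if curr_diff>max_diff:
--             max_diff=curr_diff
--             day=i
--     return day+1
-- ===== SOURCE B (Python) =====
-- def daily_air_quality(air_val):
--     diffs = [air_val[i + 1] - air_val[i] for i in range(len(air_val) - 1)]
--     if not diffs:
--         return 0
--     m = max(diffs)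
--     return diffs.index(m) + 1 if m > 0 else 0
-- ===== Notes on version B (the rewrite author's own statement) =====
-- stated objective: idiomatic
-- what changed: B builds the full list of adjacent differences and then uses max and list.index to find the first day of the largest increase, replacing A's fused running-max loop with mutable state.
import Mathlib
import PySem

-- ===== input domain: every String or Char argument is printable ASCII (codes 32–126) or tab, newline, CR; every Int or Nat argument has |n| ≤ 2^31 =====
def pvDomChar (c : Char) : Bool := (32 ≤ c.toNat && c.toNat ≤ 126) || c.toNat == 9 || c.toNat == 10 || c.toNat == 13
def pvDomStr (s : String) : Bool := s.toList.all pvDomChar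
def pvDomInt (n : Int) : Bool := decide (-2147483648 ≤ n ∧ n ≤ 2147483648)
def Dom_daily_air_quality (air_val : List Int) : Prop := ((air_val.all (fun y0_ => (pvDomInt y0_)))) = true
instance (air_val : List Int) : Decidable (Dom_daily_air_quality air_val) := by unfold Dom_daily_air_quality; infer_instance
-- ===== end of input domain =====

-- B replaces A's fused running-max loop with mutable state by building the list of adjacent
-- differences and then using max / first-index on it (idiomatic decomposition; same asymptotic cost).

-- ===== PORT A =====
def daily_air_quality (air_val : List Int) : Int :=
  let st := (PySem.List.pyRange 0 ((air_val.length : Int) - 1) 1).foldl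
    (fun (s : Int × Int) i =>
      let curr_diff := max s.1 (PySem.List.pyGetD air_val (i + 1) 0 - PySem.List.pyGetD air_val i 0)
      if curr_diff > s.1 then (curr_diff, i) else s)
    (0, -1)
  st.2 + 1

-- ===== PORT B =====
def daily_air_quality_alt (air_val : List Int) : Int :=
  let diffs := (PySem.List.pyRange 0 ((air_val.length : Int) - 1) 1).map
      (fun i => PySem.List.pyGetD air_val (i + 1) 0 - PySem.List.pyGetD air_val i 0)
  if diffs = [] then 0
  else
    let m := (PySem.List.max? diffs (fun x => x)).getD 0
    if m > 0 then ((PySem.List.index? diffs m).getD 0 : Int) + 1 else 0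

-- ===== PRECONDITION & SPEC =====
def Spec_daily_air_quality (air_val : List Int) (out : Int) : Prop := out = daily_air_quality_alt air_val
instance (air_val : List Int) (out : Int) : Decidable (Spec_daily_air_quality air_val out) := by unfold Spec_daily_air_quality; infer_instance

-- ===== CLAIM (what is proved, stated in full; the proofs are below) =====
def Claim_equal_daily_air_quality : Prop := ∀ (air_val : List Int), Dom_daily_air_quality air_val → Spec_daily_air_quality air_val (daily_air_quality air_val)

-- ===== LEMMAS AND PROOFS =====

-- "day" computed B-style from a difference list: first index of the max if it beats md, else day.
def pvPick (ds : List Int) (a md day : Int) : Int :=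
  match PySem.List.max? ds (fun x => x) with
  | none => day
  | some m => if m > md then a + ((PySem.List.index? ds m).getD 0 : Int) else day

theorem pvPick_none {ds : List Int} (h : PySem.List.max? ds (fun x => x) = none)
    (a md day : Int) : pvPick ds a md day = day := by
  unfold pvPick
  rw [h]

theorem pvPick_some {ds : List Int} {m : Int} (h : PySem.List.max? ds (fun x => x) = some m)
    (a md day : Int) :
    pvPick ds a md day = if m > md then a + ((PySem.List.index? ds m).getD 0 : Int) else day := by
  unfold pvPick
  rw [h]

-- The maximal value of an Int list under the identity key is unique, so max? is
-- determined by membership + being an upper bound.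
theorem pv_max?_eq_of (xs : List Int) (m : Int) (hm : m ∈ xs) (hub : ∀ y ∈ xs, y ≤ m) :
    PySem.List.max? xs (fun x => x) = some m := by
  cases hmax : PySem.List.max? xs (fun x => x) with
  | none =>
      rw [PySem.List.max?_eq_none_iff] at hmax
      simp [hmax] at hm
  | some M =>
      have hMmem := PySem.List.max?_mem hmax
      have hMub := PySem.List.max?_isMax hmax
      have : M = m := le_antisymm (hub M hMmem) (hMub m hm)
      simp [this]

-- Main invariant: the day component of A's fold over range [a, b) equals the day
-- computed from the mapped difference list via max? / index? (B's decomposition).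
theorem pv_fold_spec (f : Int → Int) (b : Int) :
    ∀ (n : Nat) (a md day : Int), (b - a).toNat = n →
    ((PySem.List.pyRange a b 1).foldl
      (fun (s : Int × Int) i => if max s.1 (f i) > s.1 then (max s.1 (f i), i) else s)
      (md, day)).2
    = pvPick ((PySem.List.pyRange a b 1).map f) a md day := by
  intro n
  induction n with
  | zero =>
      intro a md day hn
      have hba : b ≤ a := by omega
      rw [PySem.List.pyRange_one_eq_nil hba]
      simp only [List.map_nil, List.foldl_nil]
      rw [pvPick_none ((PySem.List.max?_eq_none_iff _ _).mpr rfl)]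
  | succ k ih =>
      intro a md day hn
      have hab : a < b := by omega
      have hk : (b - (a + 1)).toNat = k := by omega
      rw [PySem.List.pyRange_one_cons hab]
      simp only [List.foldl_cons, List.map_cons]
      set t := (PySem.List.pyRange (a + 1) b 1).map f with ht
      by_cases hx : f a > md
      · have hstep : (if max md (f a) > md then (max md (f a), a) else (md, day)) = (f a, a) := by
          have hmx : max md (f a) = f a := by omega
          rw [hmx]; simp [hx]
        rw [hstep, ih (a + 1) (f a) a hk, ← ht]
        cases hmaxt : PySem.List.max? t (fun x => x) with
        | none =>
            have htnil : t = [] := (PySem.List.max?_eq_none_iff t _).mp hmaxt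
            have hmax : PySem.List.max? (f a :: t) (fun x => x) = some (f a) := by
              apply pv_max?_eq_of
              · simp
              · intro y hy; rw [htnil] at hy; simp at hy; omega
            rw [pvPick_none hmaxt, pvPick_some hmax, PySem.List.index?_cons_self]
            simp [hx]
        | some m' =>
            have hm'mem := PySem.List.max?_mem hmaxt
            have hm'ub := PySem.List.max?_isMax (key := fun x => x) hmaxt
            by_cases hcmp : m' > f a
            · have hmax : PySem.List.max? (f a :: t) (fun x => x) = some m' := by
                apply pv_max?_eq_of
                · exact List.mem_cons_of_mem _ hm'mem
                · intro y hy
                  rcases List.mem_cons.mp hy with h | h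
                  · omega
                  · exact hm'ub y h
              have hne : f a ≠ m' := by omega
              obtain ⟨j, hj⟩ := Option.isSome_iff_exists.mp
                ((PySem.List.index?_isSome_iff t m').mpr hm'mem)
              have hm'md : m' > md := by omega
              rw [pvPick_some hmaxt, pvPick_some hmax,
                  PySem.List.index?_cons_of_ne t hne, hj]
              simp [hcmp, hm'md]
              omega
            · have hmax : PySem.List.max? (f a :: t) (fun x => x) = some (f a) := by
                apply pv_max?_eq_of
                · simp
                · intro y hy
                  rcases List.mem_cons.mp hy with h | h
                  · omega
                  · have := hm'ub y h; simp at this; omega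
              rw [pvPick_some hmaxt, pvPick_some hmax, PySem.List.index?_cons_self]
              simp [hcmp, hx]
      · have hstep : (if max md (f a) > md then (max md (f a), a) else (md, day)) = (md, day) := by
          have hmx : max md (f a) = md := by omega
          rw [hmx]; simp
        rw [hstep, ih (a + 1) md day hk, ← ht]
        cases hmaxt : PySem.List.max? t (fun x => x) with
        | none =>
            have htnil : t = [] := (PySem.List.max?_eq_none_iff t _).mp hmaxt
            have hmax : PySem.List.max? (f a :: t) (fun x => x) = some (f a) := by
              apply pv_max?_eq_of
              · simp
              · intro y hy; rw [htnil] at hy; simp at hy; omega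
            rw [pvPick_none hmaxt, pvPick_some hmax]
            simp [hx]
        | some m' =>
            have hm'mem := PySem.List.max?_mem hmaxt
            have hm'ub := PySem.List.max?_isMax (key := fun x => x) hmaxt
            by_cases hfm : m' > f a
            · have hmax : PySem.List.max? (f a :: t) (fun x => x) = some m' := by
                apply pv_max?_eq_of
                · exact List.mem_cons_of_mem _ hm'mem
                · intro y hy
                  rcases List.mem_cons.mp hy with h | h
                  · omega
                  · exact hm'ub y h
              by_cases hcmp : m' > md
              · have hne : f a ≠ m' := by omega
                obtain ⟨j, hj⟩ := Option.isSome_iff_exists.mp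
                  ((PySem.List.index?_isSome_iff t m').mpr hm'mem)
                rw [pvPick_some hmaxt, pvPick_some hmax,
                    PySem.List.index?_cons_of_ne t hne, hj]
                simp [hcmp]
                omega
              · rw [pvPick_some hmaxt, pvPick_some hmax]
                simp [hcmp]
            · have hmax : PySem.List.max? (f a :: t) (fun x => x) = some (f a) := by
                apply pv_max?_eq_of
                · simp
                · intro y hy
                  rcases List.mem_cons.mp hy with h | h
                  · omega
                  · have := hm'ub y h; simp at this; omega
              have hcmp : ¬ m' > md := by omega
              rw [pvPick_some hmaxt, pvPick_some hmax]
              simp [hcmp, hx]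

-- ===== VERDICT (by name: the statement is the Claim_ definition above) =====
theorem daily_air_quality_spec : Claim_equal_daily_air_quality := by
  intro air_val _
  unfold Spec_daily_air_quality
  simp only [daily_air_quality, daily_air_quality_alt]
  have key := pv_fold_spec
    (fun i => PySem.List.pyGetD air_val (i + 1) 0 - PySem.List.pyGetD air_val i 0)
    ((air_val.length : Int) - 1)
    (((air_val.length : Int) - 1) - 0).toNat 0 0 (-1) rfl
  simp only [] at key
  rw [key]
  cases hmax : PySem.List.max?
      ((PySem.List.pyRange 0 ((air_val.length : Int) - 1) 1).map
        (fun i => PySem.List.pyGetD air_val (i + 1) 0 - PySem.List.pyGetD air_val i 0))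
      (fun x => x) with
  | none =>
      have hnil := (PySem.List.max?_eq_none_iff _ _).mp hmax
      rw [pvPick_none hmax]
      simp [hnil]
  | some m =>
      have hne : (PySem.List.pyRange 0 ((air_val.length : Int) - 1) 1).map
          (fun i => PySem.List.pyGetD air_val (i + 1) 0 - PySem.List.pyGetD air_val i 0) ≠ [] := by
        intro h
        rw [h, (PySem.List.max?_eq_none_iff ([] : List Int) (fun x => x)).mpr rfl] at hmax
        cases hmax
      rw [pvPick_some hmax]
      simp only [if_neg hne, Option.getD_some]
      by_cases hm : m > 0
      · simp [hm]
      · simp [hm]
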